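-- pv_equiv track=rewrite | github.com/HyungJunGoo/AlgorithmProblems | Programmers/lv4/kakao_min_sales_dp.py | solution
-- ===== SOURCE A (Python) =====
-- def dfs(team_info, member_info, dp, team_leaders, node):
--     if team_leaders[node] != True:
--         return
--     for k in team_info[node]:
--         dfs(team_info, member_info, dp, team_leaders, k[0])
--     sum_child = sum(
--         [
--             min(
--                 #k[0]  자식 노드 번호
--                 #k[1]  자식 노드의 매출
--                 dp[k[0]][0], dp[k[0]][1]
--             )
--             for k in team_info[node]
--         ]
--     )
--     dp[node][1] = sum_child + member_info[node]
--     cnt = 0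
--     for k in team_info[node]:
--         if dp[k[0]][0] > dp[k[0]][1]:
--             cnt += 1
--             break
--     if cnt > 0: # 자식중에 참석 안하는 경우보다 하는 경우가 더 최적인 경우가 있으면
--         dp[node][0] = sum_child
--     else:
--         dp[node][0] = sum_child + min(
--             [
--                 dp[k[0]][1] - dp[k[0]][0]
--                 for k in team_info[node]
--             ]
--         )
--     return min(dp[node][0], dp[node][1])
--
-- def solution(sales, links):
--     member_info = dict()
--     leader_dict = dict()
--     for i, s in enumerate(sales):
--         member_info[i+1] = s
--         leader_dict[i+1] = False
--     team_info = dict()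
--     for l in links:
--         team_info[l[0]] = []
--         leader_dict[l[0]] = True
--     for l in links:
--         team_info[l[0]].append([l[1], member_info[l[1]]]) # 코드 리팩터 필요
--     team_leaders = list(team_info.keys())
--
--     dp = [[0, member_info[i+1]] for i in range(len(sales))]
--     dp.insert(0, [0,0])
--     dfs(team_info, member_info, dp, leader_dict, 1)
--     return min(dp[1][0], dp[1][1])
-- ===== SOURCE B (Python) =====
-- def solution(sales, links):
--     # B: no recursion and no dp table.  Build a children map; compute the set of
--     # nodes reachable from node 1 by fixpoint closure; then solve the reachable
--     # leaders by rounds of a readiness sweep (Kahn-style): a leader is ready once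
--     # every leader among its children is solved; repeat until node 1 is solved.
--     children = {}
--     for l in links:
--         children.setdefault(l[0], []).append(l[1])
--
--     reach = {1}
--     while True:
--         new = [c for v in children if v in reach
--                  for c in children[v] if c not in reach]
--         if not new:
--             break
--         reach.update(new)
--
--     solved = {}
--
--     def pair(v):
--         return solved[v] if v in children else (0, sales[v - 1])
--
--     while 1 in children and 1 not in solved:
--         for v, kids in children.items():
--             if v not in reach or v in solved:
--                 continue
--             if any(c in children and c not in solved for c in kids):
--                 continue
--             pairs = [pair(c) for c in kids]
--             total = sum(min(p0, p1) for p0, p1 in pairs)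
--             if any(p0 > p1 for p0, p1 in pairs):
--                 absent = total
--             else:
--                 absent = total + min(p1 - p0 for p0, p1 in pairs)
--             solved[v] = (absent, total + sales[v - 1])
--
--     p0, p1 = pair(1)
--     return min(p0, p1)
-- ===== Notes on version B (the rewrite author's own statement) =====
-- stated objective: alternative
-- what changed: A solves the tree DP by a recursive dfs mutating a shared dp table built from three dicts; B has no recursion and no dp table: it builds one children map, computes the set of nodes reachable from node 1 by a fixpoint closure, then solves reachable leaders in Kahn-style readiness sweeps (a leader is solved once all leader children are solved) until node 1 is solved.
import Mathlib
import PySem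

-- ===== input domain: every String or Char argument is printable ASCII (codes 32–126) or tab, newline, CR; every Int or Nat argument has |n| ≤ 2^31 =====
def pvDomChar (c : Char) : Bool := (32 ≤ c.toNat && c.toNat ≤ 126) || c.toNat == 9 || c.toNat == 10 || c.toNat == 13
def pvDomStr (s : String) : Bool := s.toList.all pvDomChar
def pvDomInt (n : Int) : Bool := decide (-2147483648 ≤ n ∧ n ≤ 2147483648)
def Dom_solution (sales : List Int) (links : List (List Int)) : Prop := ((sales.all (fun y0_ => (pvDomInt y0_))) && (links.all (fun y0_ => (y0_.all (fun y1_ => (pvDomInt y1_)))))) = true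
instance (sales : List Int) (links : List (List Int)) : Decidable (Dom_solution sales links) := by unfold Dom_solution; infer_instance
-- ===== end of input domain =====

-- B replaces A's recursive dict-and-mutable-dp dfs by an iteration-only algorithm:
-- a reachability fixpoint closure from node 1, then Kahn-style readiness sweeps that
-- solve reachable leaders bottom-up; no recursion, no dp table (objective: alternative).


-- ===== PORT A =====
-- l[i] for the in-range, nonnegative indices Pre_ admits (default never read there)
def pvGet (l : List Int) (i : Int) : Int := (PySem.List.pyGet? l i).getD 0
-- dp[i] / dp[i][j] / dp[i][j] = x; exact for the nonnegative in-range indices occurring under Pre_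
def dpRowA (dp : List (List Int)) (i : Int) : List Int := PySem.List.pyGetD dp i []
def dpGetA (dp : List (List Int)) (i j : Int) : Int := PySem.List.pyGetD (dpRowA dp i) j 0
def dpSetA (dp : List (List Int)) (i j : Int) (x : Int) : List (List Int) :=
  PySem.List.pySetD dp i (PySem.List.pySetD (dpRowA dp i) j x)

-- A's 'cnt' loop: cnt starts at 0, +1 then break at the first child with dp[c][0] > dp[c][1]
def cntLoopA (dp : List (List Int)) : List (List Int) → Int
  | [] => 0
  | k :: rest => if dpGetA dp (pvGet k 0) 0 > dpGetA dp (pvGet k 0) 1 then 1 else cntLoopA dp rest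

-- A's dfs; its Python return value is never used by solution, so the port returns the
-- mutated dp state; the Nat fuel only makes the recursion structural (under Pre_ the
-- reachable link graph is acyclic, so the fuel is never exhausted)
def dfsA (ti : PySem.Dict Int (List (List Int))) (mi : PySem.Dict Int Int)
    (ld : PySem.Dict Int Bool) : Nat → List (List Int) → Int → List (List Int)
  | 0, dp, _ => dp
  | fuel+1, dp, node =>
    if ld.getD node false ≠ true then dp
    else
      let ks := ti.getD node []
      let dp1 := ks.foldl (fun dp k => dfsA ti mi ld fuel dp (pvGet k 0)) dp
      let sumChild := (ks.map (fun k => min (dpGetA dp1 (pvGet k 0) 0) (dpGetA dp1 (pvGet k 0) 1))).sum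
      let dp2 := dpSetA dp1 node 1 (sumChild + mi.getD node 0)
      if cntLoopA dp2 ks > 0 then dpSetA dp2 node 0 sumChild
      else dpSetA dp2 node 0 (sumChild +
        (PySem.List.min? (ks.map (fun k => dpGetA dp2 (pvGet k 0) 1 - dpGetA dp2 (pvGet k 0) 0))
          (fun x => x)).getD 0)

def solution (sales : List Int) (links : List (List Int)) : Int :=
  -- one loop filling member_info and leader_dict together
  let mild := (PySem.List.enumerate sales 0).foldl
      (fun (d : PySem.Dict Int Int × PySem.Dict Int Bool) p =>
        (d.1.insert (p.1 + 1) p.2, d.2.insert (p.1 + 1) false))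
      (PySem.Dict.empty, PySem.Dict.empty)
  -- one loop resetting team_info[l[0]] and setting leader_dict[l[0]]
  let tild := links.foldl
      (fun (d : PySem.Dict Int (List (List Int)) × PySem.Dict Int Bool) l =>
        (d.1.insert (pvGet l 0) [], d.2.insert (pvGet l 0) true))
      (PySem.Dict.empty, mild.2)
  -- team_info[l[0]].append([l[1], member_info[l[1]]])
  let ti := links.foldl
      (fun d l => d.insert (pvGet l 0) (d.getD (pvGet l 0) [] ++ [[pvGet l 1, mild.1.getD (pvGet l 1) 0]]))
      tild.1
  -- team_leaders = list(team_info.keys()) is never used afterwards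
  let dp0 := (PySem.List.pyRange 0 (sales.length : Int) 1).map (fun i => [0, mild.1.getD (i + 1) 0])
  let dp := PySem.List.insert dp0 0 [0, 0]
  let dpf := dfsA ti mild.1 tild.2 (sales.length + 1) dp 1
  min (dpGetA dpf 1 0) (dpGetA dpf 1 1)

-- ===== PORT B =====
-- new = [c for v in children if v in reach for c in children[v] if c not in reach]
def newNodesB (ch : PySem.Dict Int (List Int)) (reach : PySem.Set Int) : List Int :=
  ch.items.foldl
    (fun acc vk =>
      if PySem.Set.contains reach vk.1 then acc ++ vk.2.filter (fun c => !PySem.Set.contains reach c)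
      else acc) []

-- the 'while True: … break' closure loop; the Nat fuel only bounds the iteration count
-- (each non-breaking pass adds a node, so links.length+1 passes always reach the break)
def reachLoopB (ch : PySem.Dict Int (List Int)) : Nat → PySem.Set Int → PySem.Set Int
  | 0, r => r
  | f+1, r =>
    let nw := newNodesB ch r
    if nw = [] then r else reachLoopB ch f (PySem.Set.update r nw)

-- pair(v); Python reads solved[v], which its callers only do after checking membership,
-- so the total .getD (0,0) form is never read at its default
def bpairB (ch : PySem.Dict Int (List Int)) (sales : List Int)
    (sv : PySem.Dict Int (Int × Int)) (v : Int) : Int × Int :=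
  if ch.contains v then (sv.get? v).getD (0, 0) else (0, pvGet sales (v - 1))

-- one 'for v, kids in children.items():' readiness sweep, mutating solved as it goes
def roundB (ch : PySem.Dict Int (List Int)) (sales : List Int) (reach : PySem.Set Int)
    (sv0 : PySem.Dict Int (Int × Int)) : PySem.Dict Int (Int × Int) :=
  ch.items.foldl
    (fun sv vk =>
      if !PySem.Set.contains reach vk.1 || sv.contains vk.1 then sv
      else if vk.2.any (fun c => ch.contains c && !sv.contains c) then sv
      else
        let pairs := vk.2.map (fun c => bpairB ch sales sv c)
        let total := (pairs.map (fun p => min p.1 p.2)).sum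
        let absent := if pairs.any (fun p => decide (p.1 > p.2)) then total
          else total + (PySem.List.min? (pairs.map (fun p => p.2 - p.1)) (fun x => x)).getD 0
        sv.insert vk.1 (absent, total + pvGet sales (vk.1 - 1)))
    sv0

-- 'while 1 in children and 1 not in solved:'; fuel bounds the rounds (under Pre_ each
-- round solves a fresh reachable leader, so links.length+1 rounds always finish)
def loopB (ch : PySem.Dict Int (List Int)) (sales : List Int) (reach : PySem.Set Int) :
    Nat → PySem.Dict Int (Int × Int) → PySem.Dict Int (Int × Int)
  | 0, sv => sv
  | f+1, sv =>
    if ch.contains 1 && !sv.contains 1 then loopB ch sales reach f (roundB ch sales reach sv)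
    else sv

def solution_alt (sales : List Int) (links : List (List Int)) : Int :=
  -- children.setdefault(l[0], []).append(l[1])
  let ch := links.foldl
      (fun d l => d.insert (pvGet l 0) (d.getD (pvGet l 0) [] ++ [pvGet l 1])) PySem.Dict.empty
  let reach := reachLoopB ch (links.length + 1) (PySem.Set.ofList [1])
  let sv := loopB ch sales reach (links.length + 1) PySem.Dict.empty
  let p := if ch.contains 1 then (sv.get? 1).getD (0, 0) else (0, pvGet sales (1 - 1))
  min p.1 p.2

-- ===== PRECONDITION & SPEC =====
-- helpers for Pre_: the children of v in the link graph, and its bounded closure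
def kidsOf (links : List (List Int)) (v : Int) : List Int :=
  links.filterMap (fun l => if pvGet l 0 = v then some (pvGet l 1) else none)
def stepR (links : List (List Int)) (s : List Int) : List Int :=
  s.foldl (fun acc v => (kidsOf links v).foldl PySem.Set.add acc) s
def iterR (links : List (List Int)) : Nat → List Int → List Int
  | 0, s => s
  | k+1, s => stepR links (iterR links k s)
def reachS (links : List (List Int)) : List Int :=
  iterR links (links.length + 1) (PySem.Set.ofList [1])
def descS (links : List (List Int)) (v : Int) : List Int :=
  iterR links (links.length + 1) (PySem.Set.ofList (kidsOf links v))

-- Pre_ is exactly the inputs on which A returns: it excludes empty sales and links whose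
-- rows are shorter than 2 or whose child id l[1] is outside 1..len(sales) (IndexError /
-- KeyError while A builds its dicts), and link graphs with a cycle reachable from node 1
-- (A's dfs recurses forever: RecursionError); reachS/descS is the bounded closure of the
-- link graph, not A's dp recursion.
def Pre_solution (sales : List Int) (links : List (List Int)) : Prop :=
  sales ≠ [] ∧
  (∀ l ∈ links, 2 ≤ l.length ∧ 1 ≤ l.getD 1 0 ∧ l.getD 1 0 ≤ (sales.length : Int)) ∧
  (∀ v ∈ reachS links, v ∉ descS links v)
instance (sales : List Int) (links : List (List Int)) : Decidable (Pre_solution sales links) := by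
  unfold Pre_solution; infer_instance

def pvWitness_solution : List Int × List (List Int) := ([10, 20, 30], [[1, 2], [1, 3]])

def Spec_solution (sales : List Int) (links : List (List Int)) (out : Int) : Prop := out = solution_alt sales links
instance (sales : List Int) (links : List (List Int)) (out : Int) : Decidable (Spec_solution sales links out) := by unfold Spec_solution; infer_instance

-- ===== CLAIM (what is proved, stated in full; the proofs are below) =====
def Claim_equal_solution : Prop := ∀ (sales : List Int) (links : List (List Int)), Dom_solution sales links → Pre_solution sales links → Spec_solution sales links (solution sales links)

-- ===== LEMMAS AND PROOFS =====

-- the edge relation of the link graph and reachability from node 1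
def E (links : List (List Int)) (u c : Int) : Prop := c ∈ kidsOf links u
def Reach1 (links : List (List Int)) (v : Int) : Prop := Relation.ReflTransGen (E links) 1 v
def isLd (links : List (List Int)) (v : Int) : Bool := links.any (fun l => pvGet l 0 == v)
def salesAt (sales : List Int) (v : Int) : Int := pvGet sales (v - 1)
def targetsOf (links : List (List Int)) : List Int := links.map (fun l => pvGet l 1)

-- the link-shape part of Pre_
def PreL (n : Int) (links : List (List Int)) : Prop :=
  ∀ l ∈ links, 2 ≤ l.length ∧ 1 ≤ l.getD 1 0 ∧ l.getD 1 0 ≤ n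
-- the acyclicity consequence of Pre_
def Acyc (links : List (List Int)) : Prop :=
  ∀ v, Reach1 links v → ¬ Relation.TransGen (E links) v v

-- the reference value: (cost if v absent, cost if v present), computed by a fueled
-- recursion; fuel sales.length+1 is the stable value on the reachable acyclic graph
def Fref (sales : List Int) (links : List (List Int)) : Nat → Int → Int × Int
  | 0, _ => (0, 0)
  | f+1, v =>
    if isLd links v = true then
      let ps := (kidsOf links v).map (fun c => Fref sales links f c)
      let total := (ps.map (fun p => min p.1 p.2)).sum
      ((if ps.any (fun p => decide (p.1 > p.2)) then total
        else total + (PySem.List.min? (ps.map (fun p => p.2 - p.1)) (fun x => x)).getD 0),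
       total + pvGet sales (v - 1))
    else (0, pvGet sales (v - 1))

def FF (sales : List Int) (links : List (List Int)) (v : Int) : Int × Int :=
  Fref sales links (sales.length + 1) v

-- ---- small facts about pvGet on literal child entries ----
lemma pvGet_cons_zero (a : Int) (l : List Int) : pvGet (a :: l) 0 = a := by
  simp [pvGet]

lemma pvGet_getD_one (l : List Int) (h : 2 ≤ l.length) : pvGet l 1 = l.getD 1 0 := by
  match l, h with
  | a :: b :: t, _ =>
    simp [pvGet, PySem.List.pyGet?, PySem.List.pyIdx?]

lemma mem_kids {links : List (List Int)} {v c : Int} (h : c ∈ kidsOf links v) :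
    ∃ l ∈ links, pvGet l 0 = v ∧ pvGet l 1 = c := by
  simp only [kidsOf, List.mem_filterMap] at h
  obtain ⟨l, hl, hif⟩ := h
  by_cases hk : pvGet l 0 = v
  · exact ⟨l, hl, hk, by simpa [hk] using hif⟩
  · simp [hk] at hif

lemma isLd_of_kid {links : List (List Int)} {v c : Int} (h : c ∈ kidsOf links v) :
    isLd links v = true := by
  obtain ⟨l, hl, h0, _⟩ := mem_kids h
  simp only [isLd, List.any_eq_true]
  exact ⟨l, hl, by simp [h0]⟩

lemma kid_bounds {n : Int} {links : List (List Int)} (hP : PreL n links) {v c : Int}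
    (hc : c ∈ kidsOf links v) : 1 ≤ c ∧ c ≤ n := by
  obtain ⟨l, hl, _, h1⟩ := mem_kids hc
  obtain ⟨hlen, hb1, hb2⟩ := hP l hl
  rw [pvGet_getD_one l hlen] at h1
  omega

lemma kid_mem_targets {links : List (List Int)} {v c : Int} (hc : c ∈ kidsOf links v) :
    c ∈ targetsOf links := by
  obtain ⟨l, hl, _, h1⟩ := mem_kids hc
  simp only [targetsOf, List.mem_map]
  exact ⟨l, hl, h1⟩

-- ---- the bounded closure iterR: soundness, closedness, reachability ----
lemma mem_foldl_add (xs : List Int) :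
    ∀ (acc : List Int) (x : Int), x ∈ xs.foldl PySem.Set.add acc ↔ x ∈ acc ∨ x ∈ xs := by
  induction xs with
  | nil => simp
  | cons y t ih =>
    intro acc x
    simp only [List.foldl_cons, ih, PySem.Set.mem_add, List.mem_cons]
    tauto

lemma nodup_foldl_add (xs : List Int) :
    ∀ (acc : List Int), acc.Nodup → (xs.foldl PySem.Set.add acc).Nodup := by
  induction xs with
  | nil => intro acc h; exact h
  | cons y t ih =>
    intro acc h
    exact ih _ (PySem.Set.nodup_add acc y h)

lemma mem_stepR_aux (links : List (List Int)) (t : List Int) :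
    ∀ (acc : List Int) (x : Int),
    x ∈ t.foldl (fun acc v => (kidsOf links v).foldl PySem.Set.add acc) acc ↔
      x ∈ acc ∨ ∃ u ∈ t, x ∈ kidsOf links u := by
  induction t with
  | nil => simp
  | cons u t ih =>
    intro acc x
    simp only [List.foldl_cons, ih, mem_foldl_add, List.mem_cons]
    constructor
    · rintro (⟨h | h⟩ | ⟨w, hw, hx⟩)
      · exact Or.inl h
      · exact Or.inr ⟨u, Or.inl rfl, h⟩
      · exact Or.inr ⟨w, Or.inr hw, hx⟩
    · rintro (h | ⟨w, (rfl | hw), hx⟩)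
      · exact Or.inl (Or.inl h)
      · exact Or.inl (Or.inr hx)
      · exact Or.inr ⟨w, hw, hx⟩

lemma mem_stepR (links : List (List Int)) (s : List Int) (x : Int) :
    x ∈ stepR links s ↔ x ∈ s ∨ ∃ u ∈ s, x ∈ kidsOf links u :=
  mem_stepR_aux links s s x

lemma nodup_stepR_aux (links : List (List Int)) (t : List Int) :
    ∀ (acc : List Int), acc.Nodup →
    (t.foldl (fun acc v => (kidsOf links v).foldl PySem.Set.add acc) acc).Nodup := by
  induction t with
  | nil => intro acc h; exact h
  | cons u t ih => intro acc h; exact ih _ (nodup_foldl_add _ _ h)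

lemma nodup_stepR (links : List (List Int)) (s : List Int) (h : s.Nodup) :
    (stepR links s).Nodup := nodup_stepR_aux links s s h

lemma subset_stepR (links : List (List Int)) (s : List Int) (x : Int) (h : x ∈ s) :
    x ∈ stepR links s := (mem_stepR links s x).mpr (Or.inl h)

lemma subset_iterR (links : List (List Int)) :
    ∀ (k : Nat) (s : List Int) (x : Int), x ∈ s → x ∈ iterR links k s := by
  intro k
  induction k with
  | zero => intro s x h; exact h
  | succ k ih => intro s x h; exact subset_stepR links _ x (ih s x h)

lemma nodup_iterR (links : List (List Int)) :
    ∀ (k : Nat) (s : List Int), s.Nodup → (iterR links k s).Nodup := by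
  intro k
  induction k with
  | zero => intro s h; exact h
  | succ k ih => intro s h; exact nodup_stepR links _ (ih s h)

lemma iterR_sound (links : List (List Int)) :
    ∀ (k : Nat) (s : List Int) (x : Int), x ∈ iterR links k s →
      x ∈ s ∨ ∃ u ∈ s, Relation.TransGen (E links) u x := by
  intro k
  induction k with
  | zero => intro s x h; exact Or.inl h
  | succ k ih =>
    intro s x h
    rw [iterR, mem_stepR] at h
    rcases h with h | ⟨u, hu, hx⟩
    · exact ih s x h
    · rcases ih s u hu with h | ⟨w, hw, hTG⟩
      · exact Or.inr ⟨u, h, Relation.TransGen.single hx⟩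
      · exact Or.inr ⟨w, hw, hTG.tail hx⟩

lemma iterR_universe (links : List (List Int)) :
    ∀ (k : Nat) (s : List Int) (x : Int), x ∈ iterR links k s →
      x ∈ s ∨ x ∈ targetsOf links := by
  intro k
  induction k with
  | zero => intro s x h; exact Or.inl h
  | succ k ih =>
    intro s x h
    rw [iterR, mem_stepR] at h
    rcases h with h | ⟨u, _, hx⟩
    · exact ih s x h
    · exact Or.inr (kid_mem_targets hx)

def ClosedM (links : List (List Int)) (s : List Int) : Prop :=
  ∀ x, x ∈ stepR links s → x ∈ s

lemma length_le_of_nodup_subset {t u : List Int} (hn : t.Nodup) (hs : ∀ x ∈ t, x ∈ u) :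
    t.length ≤ u.dedup.length := by
  have hsub : t ⊆ u.dedup := fun x hx => List.mem_dedup.mpr (hs x hx)
  exact (hn.subperm hsub).length_le

lemma stepR_congr_mem (links : List (List Int)) {s t : List Int}
    (h : ∀ y, y ∈ s ↔ y ∈ t) (x : Int) : x ∈ stepR links s ↔ x ∈ stepR links t := by
  rw [mem_stepR, mem_stepR]
  constructor
  · rintro (hx | ⟨u, hu, hx⟩)
    · exact Or.inl ((h x).mp hx)
    · exact Or.inr ⟨u, (h u).mp hu, hx⟩
  · rintro (hx | ⟨u, hu, hx⟩)
    · exact Or.inl ((h x).mpr hx)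
    · exact Or.inr ⟨u, (h u).mpr hu, hx⟩

lemma iterR_growth (links : List (List Int)) (s : List Int) (hs : s.Nodup) :
    ∀ k : Nat, ClosedM links (iterR links k s) ∨ s.length + k ≤ (iterR links k s).length := by
  intro k
  induction k with
  | zero => right; simp [iterR]
  | succ k ih =>
    by_cases hC : ClosedM links (iterR links k s)
    · left
      rw [iterR]
      intro x hx
      have hmemiff : ∀ y, y ∈ stepR links (iterR links k s) ↔ y ∈ iterR links k s :=
        fun y => ⟨fun h => hC y h, fun h => subset_stepR links _ y h⟩
      rw [stepR_congr_mem links hmemiff] at hx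
      exact subset_stepR links _ x (hC x hx)
    · rcases ih with h | h
      · exact absurd h hC
      · right
        rw [ClosedM, not_forall] at hC
        obtain ⟨x, hx⟩ := hC
        rw [Classical.not_imp] at hx
        have hnsub : x ∈ iterR links (k+1) s ∧ x ∉ iterR links k s := ⟨hx.1, hx.2⟩
        have hndk : (iterR links k s).Nodup := nodup_iterR links k s hs
        have hcons : (x :: iterR links k s).Nodup := List.nodup_cons.mpr ⟨hnsub.2, hndk⟩
        have hsub : (x :: iterR links k s) ⊆ iterR links (k+1) s := by
          intro y hy
          rcases List.mem_cons.mp hy with rfl | hy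
          · exact hnsub.1
          · exact subset_stepR links _ y hy
        have := (hcons.subperm hsub).length_le
        simp only [List.length_cons] at this
        omega

lemma iterR_closed_final (links : List (List Int)) (s : List Int) (hs : s.Nodup) :
    ClosedM links (iterR links (links.length + 1) s) := by
  rcases iterR_growth links s hs (links.length + 1) with h | h
  · exact h
  · exfalso
    have hnd := nodup_iterR links (links.length + 1) s hs
    have hsub : ∀ x ∈ iterR links (links.length + 1) s, x ∈ s ++ targetsOf links := by
      intro x hx
      rcases iterR_universe links _ s x hx with hx | hx
      · exact List.mem_append.mpr (Or.inl hx)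
      · exact List.mem_append.mpr (Or.inr hx)
    have hlen := length_le_of_nodup_subset hnd hsub
    have h1 : (s ++ targetsOf links).dedup.length ≤ (s ++ targetsOf links).length :=
      (List.dedup_sublist _).length_le
    have h2 : (s ++ targetsOf links).length = s.length + links.length := by
      simp [targetsOf]
    omega

lemma closed_rtg (links : List (List Int)) {C : List Int} (hC : ClosedM links C) :
    ∀ {x y : Int}, Relation.ReflTransGen (E links) x y → x ∈ C → y ∈ C := by
  intro x y h
  induction h with
  | refl => exact fun h => h
  | tail _ hE ih =>
    intro hx
    rename_i b c _
    exact hC c ((mem_stepR links C c).mpr (Or.inr ⟨b, ih hx, hE⟩))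

lemma reachS_complete {links : List (List Int)} {v : Int} (h : Reach1 links v) :
    v ∈ reachS links := by
  have h1 : (1 : Int) ∈ PySem.Set.ofList [1] := by simp [PySem.Set.mem_ofList]
  exact closed_rtg links (iterR_closed_final links _ (PySem.Set.nodup_ofList _)) h
    (subset_iterR links _ _ 1 h1)

lemma reachS_sound {links : List (List Int)} {v : Int} (h : v ∈ reachS links) :
    Reach1 links v := by
  rcases iterR_sound links _ _ v h with h | ⟨u, hu, hTG⟩
  · rw [PySem.Set.mem_ofList] at h
    simp at h
    subst h
    exact Relation.ReflTransGen.refl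
  · rw [PySem.Set.mem_ofList] at hu
    simp at hu
    subst hu
    exact hTG.to_reflTransGen

lemma descS_sound {links : List (List Int)} {v u : Int} (h : u ∈ descS links v) :
    Relation.TransGen (E links) v u := by
  rcases iterR_sound links _ _ u h with h | ⟨w, hw, hTG⟩
  · rw [PySem.Set.mem_ofList] at h
    exact Relation.TransGen.single h
  · rw [PySem.Set.mem_ofList] at hw
    exact (Relation.TransGen.single (show E links v w from hw)).trans hTG

lemma descS_complete {links : List (List Int)} {v u : Int}
    (h : Relation.TransGen (E links) v u) : u ∈ descS links v := by
  obtain ⟨c, hvc, hcu⟩ := (Relation.TransGen.head'_iff).mp h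
  have hc : c ∈ PySem.Set.ofList (kidsOf links v) := (PySem.Set.mem_ofList _ _).mpr hvc
  exact closed_rtg links (iterR_closed_final links _ (PySem.Set.nodup_ofList _)) hcu
    (subset_iterR links _ _ c hc)

lemma acyc_of_pre {links : List (List Int)}
    (h3 : ∀ v ∈ reachS links, v ∉ descS links v) : Acyc links := by
  intro v hv hTG
  exact h3 v (reachS_complete hv) (descS_complete hTG)

lemma reach_bounds {n : Int} {links : List (List Int)} (hP : PreL n links) (hn : 1 ≤ n)
    {v : Int} (h : Reach1 links v) : 1 ≤ v ∧ v ≤ n := by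
  rcases (Relation.reflTransGen_iff_eq_or_transGen.mp h) with rfl | hTG
  · omega
  · obtain ⟨u, _, hE⟩ := (Relation.TransGen.tail'_iff).mp hTG
    exact kid_bounds hP hE

-- ---- fuel stability of Fref on the acyclic reachable part ----
def InvA (links : List (List Int)) (n : Int) (S : Finset Int) (v : Int) : Prop :=
  Reach1 links v ∧ 1 ≤ v ∧ v ≤ n ∧ v ∉ S ∧ (∀ u ∈ S, 1 ≤ u ∧ u ≤ n) ∧
  (∀ u ∈ S, Reach1 links u ∧ Relation.TransGen (E links) u v)

lemma card_le_of_bounds {n : Int} (S : Finset Int) (h : ∀ u ∈ S, 1 ≤ u ∧ u ≤ n) (hn : 0 ≤ n) :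
    (S.card : Int) ≤ n := by
  have hsub : S ⊆ Finset.Icc 1 n := by
    intro u hu
    rcases h u hu with ⟨h1, h2⟩
    exact Finset.mem_Icc.mpr ⟨h1, h2⟩
  have := Finset.card_le_card hsub
  have hIcc : (Finset.Icc (1:Int) n).card = (n + 1 - 1).toNat := Int.card_Icc 1 n
  omega

lemma child_inv {links : List (List Int)} {n : Int} (hP : PreL n links) (hA : Acyc links)
    {S : Finset Int} {v c : Int} (hI : InvA links n S v) (hc : c ∈ kidsOf links v) :
    InvA links n (insert v S) c := by
  obtain ⟨hr, hv1, hv2, hvS, hSb, hSa⟩ := hI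
  have hrc : Reach1 links c := hr.tail hc
  have hcb := kid_bounds hP hc
  refine ⟨hrc, hcb.1, hcb.2, ?_, ?_, ?_⟩
  · intro hmem
    rcases Finset.mem_insert.mp hmem with rfl | hmem
    · exact hA c hrc (Relation.TransGen.single hc)
    · obtain ⟨hru, hTG⟩ := hSa c hmem
      exact hA c hru (hTG.tail hc)
  · intro u hu
    rcases Finset.mem_insert.mp hu with rfl | hu
    · exact ⟨hv1, hv2⟩
    · exact hSb u hu
  · intro u hu
    rcases Finset.mem_insert.mp hu with rfl | hu
    · exact ⟨hr, Relation.TransGen.single hc⟩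
    · obtain ⟨hru, hTG⟩ := hSa u hu
      exact ⟨hru, hTG.tail hc⟩

lemma card_insert_inv {S : Finset Int} {v : Int} (h : v ∉ S) :
    (insert v S).card = S.card + 1 := Finset.card_insert_of_notMem h

lemma Fref_fuel {sales : List Int} {links : List (List Int)}
    (hP : PreL (sales.length : Int) links) (hA : Acyc links) :
    ∀ (f₁ f₂ : Nat) (S : Finset Int) (v : Int), InvA links (sales.length : Int) S v →
    (sales.length : Int) + 1 - S.card ≤ (f₁ : Int) →
    (sales.length : Int) + 1 - S.card ≤ (f₂ : Int) →
    Fref sales links f₁ v = Fref sales links f₂ v := by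
  intro f₁
  induction f₁ with
  | zero =>
    intro f₂ S v hI h1 h2
    exfalso
    have hcard := card_le_of_bounds S hI.2.2.2.2.1 (by positivity)
    simp at h1
    omega
  | succ g ih =>
    intro f₂ S v hI h1 h2
    have hcard := card_le_of_bounds S hI.2.2.2.2.1 (by positivity)
    obtain ⟨g₂, rfl⟩ : ∃ g₂, f₂ = g₂ + 1 := ⟨f₂ - 1, by omega⟩
    by_cases hld : isLd links v = true
    · simp only [Fref, hld, if_true]
      have hmap : (kidsOf links v).map (fun c => Fref sales links g c)
          = (kidsOf links v).map (fun c => Fref sales links g₂ c) := by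
        apply List.map_congr_left
        intro c hc
        have hI' := child_inv hP hA hI hc
        have hcardI : (insert v S).card = S.card + 1 := card_insert_inv hI.2.2.2.1
        exact ih g₂ (insert v S) c hI' (by rw [hcardI]; push_cast; push_cast at h1; omega)
          (by rw [hcardI]; push_cast; push_cast at h2; omega)
      rw [hmap]
    · simp only [Fref, hld]
      simp [hld]

lemma FF_nonleader {sales : List Int} {links : List (List Int)} {v : Int}
    (hld : isLd links v = false) : FF sales links v = (0, pvGet sales (v - 1)) := by
  rw [FF]
  simp [Fref, hld]

lemma FF_leader {sales : List Int} {links : List (List Int)}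
    (hP : PreL (sales.length : Int) links) (hA : Acyc links) {v : Int}
    (hld : isLd links v = true) (hr : Reach1 links v) (hv1 : 1 ≤ v)
    (hv2 : v ≤ (sales.length : Int)) :
    FF sales links v =
      (let ps := (kidsOf links v).map (fun c => FF sales links c)
       let total := (ps.map (fun p => min p.1 p.2)).sum
       ((if ps.any (fun p => decide (p.1 > p.2)) then total
         else total + (PySem.List.min? (ps.map (fun p => p.2 - p.1)) (fun x => x)).getD 0),
        total + pvGet sales (v - 1))) := by
  have hI : InvA links (sales.length : Int) ∅ v :=
    ⟨hr, hv1, hv2, by simp, by simp, by simp⟩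
  rw [FF]
  simp only [Fref, hld, if_true]
  have hmap : (kidsOf links v).map (fun c => Fref sales links sales.length c)
      = (kidsOf links v).map (fun c => FF sales links c) := by
    apply List.map_congr_left
    intro c hc
    have hI' := child_inv hP hA hI hc
    have : (insert v (∅ : Finset Int)).card = 1 := by simp
    exact Fref_fuel hP hA sales.length (sales.length + 1) (insert v ∅) c hI'
      (by rw [this]; push_cast; omega) (by rw [this]; push_cast; omega)
  rw [hmap]

-- ---- dict building loops (shared by both ports' proofs) ----
lemma getD_foldl_insert_append {β : Type} (key : List Int → Int) (val : List Int → β) :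
    ∀ (ls : List (List Int)) (d : PySem.Dict Int (List β)) (v : Int),
    (ls.foldl (fun d l => d.insert (key l) (d.getD (key l) [] ++ [val l])) d).getD v []
      = d.getD v [] ++ ls.filterMap (fun l => if key l = v then some (val l) else none) := by
  intro ls
  induction ls with
  | nil => simp
  | cons l t ih =>
    intro d v
    simp only [List.foldl_cons, List.filterMap_cons, ih]
    by_cases h : key l = v
    · subst h; simp
    · simp [PySem.Dict.getD_insert, h, Ne.symm h]

lemma contains_foldl_insert {ν : Type} (key : List Int → Int)
    (f : PySem.Dict Int ν → List Int → ν) :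
    ∀ (ls : List (List Int)) (d : PySem.Dict Int ν) (v : Int),
    (ls.foldl (fun d l => d.insert (key l) (f d l)) d).contains v
      = (d.contains v || ls.any (fun l => key l == v)) := by
  intro ls
  induction ls with
  | nil => simp
  | cons l t ih =>
    intro d v
    simp only [List.foldl_cons, List.any_cons, ih, PySem.Dict.contains_insert]
    by_cases h : key l = v
    · subst h; simp
    · have hne : (v == key l) = false := by simp [Ne.symm h]
      have hne2 : (key l == v) = false := by simp [h]
      rw [hne, hne2]; simp

lemma getD_foldl_insert_nil {β : Type} (key : List Int → Int) :
    ∀ (ls : List (List Int)) (d : PySem.Dict Int (List β)),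
    (∀ w, d.getD w [] = ([] : List β)) →
    ∀ v, (ls.foldl (fun d l => d.insert (key l) []) d).getD v [] = [] := by
  intro ls
  induction ls with
  | nil => intro d h v; exact h v
  | cons l t ih =>
    intro d h v
    refine ih _ ?_ v
    intro w
    rw [PySem.Dict.getD_insert]
    split <;> simp [h]

lemma getD_foldl_insert_false {α : Type} (key : α → Int) :
    ∀ (ls : List α) (d : PySem.Dict Int Bool),
    (∀ w, d.getD w false = false) →
    ∀ v, (ls.foldl (fun d x => d.insert (key x) false) d).getD v false = false := by
  intro ls
  induction ls with
  | nil => intro d h v; exact h v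
  | cons x t ih =>
    intro d h v
    refine ih _ ?_ v
    intro w
    rw [PySem.Dict.getD_insert]
    split <;> simp [h]

lemma getD_foldl_insert_true (key : List Int → Int) :
    ∀ (ls : List (List Int)) (d : PySem.Dict Int Bool) (v : Int),
    (ls.foldl (fun d l => d.insert (key l) true) d).getD v false
      = (ls.any (fun l => key l == v) || d.getD v false) := by
  intro ls
  induction ls with
  | nil => simp
  | cons l t ih =>
    intro d v
    simp only [List.foldl_cons, List.any_cons, ih, PySem.Dict.getD_insert]
    by_cases h : key l = v
    · subst h; simp
    · have hne2 : (key l == v) = false := by simp [h]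
      rw [hne2]
      simp [Ne.symm h]

-- ---- member_info characterization ----
lemma mi_unchanged :
    ∀ (xs : List Int) (s : Int) (d : PySem.Dict Int Int) (v : Int), v ≤ s →
    ((PySem.List.enumerate xs s).foldl (fun d p => d.insert (p.1 + 1) p.2) d).getD v 0
      = d.getD v 0 := by
  intro xs
  induction xs with
  | nil => simp [PySem.List.enumerate_nil]
  | cons x t ih =>
    intro s d v hv
    rw [PySem.List.enumerate_cons]
    simp only [List.foldl_cons]
    rw [ih (s+1) _ v (by omega), PySem.Dict.getD_insert]
    have : v ≠ s + 1 := by omega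
    simp [this]

lemma mi_getD :
    ∀ (xs : List Int) (s : Int) (d : PySem.Dict Int Int) (k : Nat), k < xs.length →
    ((PySem.List.enumerate xs s).foldl (fun d p => d.insert (p.1 + 1) p.2) d).getD (s + k + 1) 0
      = xs.getD k 0 := by
  intro xs
  induction xs with
  | nil => intro s d k hk; simp at hk
  | cons x t ih =>
    intro s d k hk
    rw [PySem.List.enumerate_cons]
    simp only [List.foldl_cons]
    match k with
    | 0 =>
      rw [show s + (0:Nat) + 1 = s + 1 by omega]
      rw [mi_unchanged t (s+1) _ (s+1) le_rfl, PySem.Dict.getD_insert]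
      simp
    | k+1 =>
      have : s + (k+1 : Nat) + 1 = (s + 1) + k + 1 := by push_cast; omega
      rw [this, ih (s+1) _ k (by simpa using hk)]
      simp

-- ---- filterMap value-through-map ----
lemma filterMap_if_map {β : Type} (g : Int → β) :
    ∀ (ls : List (List Int)) (v : Int),
    ls.filterMap (fun l => if pvGet l 0 = v then some (g (pvGet l 1)) else none)
      = (ls.filterMap (fun l => if pvGet l 0 = v then some (pvGet l 1) else none)).map g := by
  intro ls
  induction ls with
  | nil => simp
  | cons l t ih =>
    intro v
    simp only [List.filterMap_cons]
    by_cases h : pvGet l 0 = v <;> simp [h, ih]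

-- ---- dp table access ----
lemma insert_zero_cons (xs : List (List Int)) (v : List Int) :
    PySem.List.insert xs 0 v = v :: xs := by
  simp [PySem.List.insert, PySem.List.sliceIndices]

lemma length_dpSetA (dp : List (List Int)) (i j x : Int) :
    (dpSetA dp i j x).length = dp.length := by
  simp [dpSetA, PySem.List.length_pySetD]

lemma dpRow_set (dp : List (List Int)) (i w j x : Int)
    (h0 : 0 ≤ i) (h : i < (dp.length : Int)) (h0w : 0 ≤ w) (hw : w < (dp.length : Int)) :
    dpRowA (dpSetA dp i j x) w
      = if w = i then PySem.List.pySetD (dpRowA dp i) j x else dpRowA dp w := by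
  by_cases hcase : w = i
  · subst hcase
    rw [dpSetA, dpRowA, if_pos rfl]
    have hw2 : w = ((w.toNat : Nat) : Int) := by omega
    conv_lhs => rw [hw2]
    rw [PySem.List.pyGetD_pySetD_natCast dp w.toNat w.toNat _ _ (by omega)]
    simp [dpRowA, Int.toNat_of_nonneg h0w]
  · rw [if_neg hcase, dpSetA, dpRowA]
    have hw2 : w = ((w.toNat : Nat) : Int) := by omega
    have hi2 : i = ((i.toNat : Nat) : Int) := by omega
    conv_lhs => rw [hw2, hi2]
    rw [PySem.List.pyGetD_pySetD_natCast dp i.toNat w.toNat _ _ (by omega)]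
    rw [if_neg (by omega)]
    simp [dpRowA, Int.toNat_of_nonneg h0w]

lemma dpRow_cons (z : List Int) (xs : List (List Int)) (v : Int) (hv : 1 ≤ v) :
    dpRowA (z :: xs) v = PySem.List.pyGetD xs (v - 1) [] := by
  have h1 : v.toNat = (v - 1).toNat + 1 := by omega
  simp only [dpRowA, PySem.List.pyGetD]
  rw [PySem.List.pyGet?_of_nonneg (xs := z :: xs) (by omega : (0:Int) ≤ v), h1,
      PySem.List.pyGet?_of_nonneg (xs := xs) (by omega : (0:Int) ≤ v - 1)]
  simp

lemma pyGetD_pair_one (a b : Int) : PySem.List.pyGetD [a, b] 1 0 = b := rfl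
lemma pySetD_pair_one (a b x : Int) : PySem.List.pySetD [a, b] 1 x = [a, x] := rfl
lemma pySetD_pair_zero (a b y : Int) : PySem.List.pySetD [a, b] 0 y = [y, b] := rfl

lemma dpGet_row_pair (dp : List (List Int)) (v a b : Int) (h : dpRowA dp v = [a, b]) :
    dpGetA dp v 0 = a ∧ dpGetA dp v 1 = b := by
  constructor <;> simp [dpGetA, h, pyGetD_pair_one]

-- proof-level names for the dicts A builds
def miOf (sales : List Int) : PySem.Dict Int Int :=
  (PySem.List.enumerate sales 0).foldl (fun d p => d.insert (p.1 + 1) p.2) PySem.Dict.empty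
def ld0Of (sales : List Int) : PySem.Dict Int Bool :=
  (PySem.List.enumerate sales 0).foldl (fun d p => d.insert (p.1 + 1) false) PySem.Dict.empty
def ldOf (sales : List Int) (links : List (List Int)) : PySem.Dict Int Bool :=
  links.foldl (fun d l => d.insert (pvGet l 0) true) (ld0Of sales)
def ti0Of (links : List (List Int)) : PySem.Dict Int (List (List Int)) :=
  links.foldl (fun d l => d.insert (pvGet l 0) ([] : List (List Int))) PySem.Dict.empty
def tiOf (sales : List Int) (links : List (List Int)) : PySem.Dict Int (List (List Int)) :=
  links.foldl
    (fun d l => d.insert (pvGet l 0) (d.getD (pvGet l 0) [] ++ [[pvGet l 1, (miOf sales).getD (pvGet l 1) 0]]))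
    (ti0Of links)
def dpInit0 (sales : List Int) : List (List Int) :=
  (PySem.List.pyRange 0 (sales.length : Int) 1).map (fun i => [0, (miOf sales).getD (i + 1) 0])

lemma solution_eq (sales : List Int) (links : List (List Int)) :
    solution sales links
      = min (dpGetA (dfsA (tiOf sales links) (miOf sales) (ldOf sales links)
              (sales.length + 1) ([0, 0] :: dpInit0 sales) 1) 1 0)
            (dpGetA (dfsA (tiOf sales links) (miOf sales) (ldOf sales links)
              (sales.length + 1) ([0, 0] :: dpInit0 sales) 1) 1 1) := by
  simp only [solution]
  rw [PySem.List.foldl_prod_mk (fun (a : PySem.Dict Int Int) (p : Int × Int) => a.insert (p.1 + 1) p.2)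
      (fun (b : PySem.Dict Int Bool) (p : Int × Int) => b.insert (p.1 + 1) false)]
  rw [PySem.List.foldl_prod_mk (fun (a : PySem.Dict Int (List (List Int))) (l : List Int) => a.insert (pvGet l 0) ([] : List (List Int)))
      (fun (b : PySem.Dict Int Bool) (l : List Int) => b.insert (pvGet l 0) true)]
  rw [insert_zero_cons]
  rfl

lemma miOf_at (sales : List Int) (v : Int) (h1 : 1 ≤ v) (h2 : v ≤ (sales.length : Int)) :
    (miOf sales).getD v 0 = salesAt sales v := by
  have hk : ((v - 1).toNat : Int) < (sales.length : Int) := by omega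
  have := mi_getD sales 0 PySem.Dict.empty (v - 1).toNat (by omega)
  rw [show (0 : Int) + ((v - 1).toNat : Int) + 1 = v from by omega] at this
  rw [miOf, this, salesAt, pvGet]
  rw [show PySem.List.pyGet? sales (v - 1) = sales[(v-1).toNat]? from
    PySem.List.pyGet?_of_nonneg sales (by omega : (0:Int) ≤ v - 1)]
  simp [List.getD_eq_getElem?_getD]

lemma ldOf_getD (sales : List Int) (links : List (List Int)) (v : Int) :
    (ldOf sales links).getD v false = isLd links v := by
  rw [ldOf, getD_foldl_insert_true (fun l => pvGet l 0) links (ld0Of sales) v]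
  rw [ld0Of, getD_foldl_insert_false (fun p : Int × Int => p.1 + 1) _ PySem.Dict.empty
    (by intro w; simp) v]
  simp [isLd]

lemma tiOf_getD (sales : List Int) (links : List (List Int)) (v : Int) :
    (tiOf sales links).getD v []
      = (kidsOf links v).map (fun c => [c, (miOf sales).getD c 0]) := by
  rw [tiOf, getD_foldl_insert_append (fun l => pvGet l 0)
    (fun l => [pvGet l 1, (miOf sales).getD (pvGet l 1) 0]) links (ti0Of links) v]
  rw [ti0Of, getD_foldl_insert_nil (fun l => pvGet l 0) links PySem.Dict.empty (by intro w; simp) v]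
  rw [filterMap_if_map (fun c => [c, (miOf sales).getD c 0]) links v]
  simp [kidsOf]

def FL (sales : List Int) (links : List (List Int)) (w : Int) : List Int :=
  [(FF sales links w).1, (FF sales links w).2]

def InvP (sales : List Int) (links : List (List Int)) (dp : List (List Int)) : Prop :=
  ∀ w, 1 ≤ w → w ≤ (sales.length : Int) →
    dpRowA dp w = [0, salesAt sales w] ∨ dpRowA dp w = FL sales links w

def ConclP (sales : List Int) (links : List (List Int)) (fuel : Nat) (v : Int)
    (dp : List (List Int)) : Prop :=
  (dfsA (tiOf sales links) (miOf sales) (ldOf sales links) fuel dp v).length = sales.length + 1 ∧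
  (∀ w, 1 ≤ w → w ≤ (sales.length : Int) →
     dpRowA (dfsA (tiOf sales links) (miOf sales) (ldOf sales links) fuel dp v) w = dpRowA dp w ∨
     dpRowA (dfsA (tiOf sales links) (miOf sales) (ldOf sales links) fuel dp v) w = FL sales links w) ∧
  dpRowA (dfsA (tiOf sales links) (miOf sales) (ldOf sales links) fuel dp v) v = FL sales links v

lemma FL_nonleader {sales : List Int} {links : List (List Int)} {w : Int}
    (hld : isLd links w = false) : FL sales links w = [0, salesAt sales w] := by
  rw [FL, FF_nonleader hld]
  rfl

lemma cnt_spec (dp : List (List Int)) :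
    ∀ ks : List (List Int),
    cntLoopA dp ks
      = if ks.any (fun k => decide (dpGetA dp (pvGet k 0) 0 > dpGetA dp (pvGet k 0) 1)) = true
        then 1 else 0 := by
  intro ks
  induction ks with
  | nil => simp [cntLoopA]
  | cons k t ih =>
    simp only [cntLoopA, List.any_cons]
    by_cases h : dpGetA dp (pvGet k 0) 0 > dpGetA dp (pvGet k 0) 1 <;> simp [h, ih]

lemma dfsA_nonleader (ti : PySem.Dict Int (List (List Int))) (mi : PySem.Dict Int Int)
    (ld : PySem.Dict Int Bool) (node : Int) (h : ld.getD node false = false) :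
    ∀ (fuel : Nat) (dp : List (List Int)), dfsA ti mi ld fuel dp node = dp := by
  intro fuel dp
  cases fuel with
  | zero => rfl
  | succ f => simp [dfsA, h]

lemma dfsA_leader (sales : List Int) (links : List (List Int)) (g : Nat)
    (dp : List (List Int)) (v : Int) (hld : isLd links v = true) :
    dfsA (tiOf sales links) (miOf sales) (ldOf sales links) (g + 1) dp v
      = (let cs := kidsOf links v
         let dp1 := cs.foldl
           (fun dp c => dfsA (tiOf sales links) (miOf sales) (ldOf sales links) g dp c) dp
         let S := (cs.map (fun c => min (dpGetA dp1 c 0) (dpGetA dp1 c 1))).sum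
         let dp2 := dpSetA dp1 v 1 (S + (miOf sales).getD v 0)
         if cs.any (fun c => decide (dpGetA dp2 c 0 > dpGetA dp2 c 1)) = true
         then dpSetA dp2 v 0 S
         else dpSetA dp2 v 0 (S +
           (PySem.List.min? (cs.map (fun c => dpGetA dp2 c 1 - dpGetA dp2 c 0))
             (fun x => x)).getD 0)) := by
  simp only [dfsA, ldOf_getD, hld, ne_eq, not_true_eq_false, if_false, tiOf_getD,
    List.foldl_map, List.map_map, cnt_spec, List.any_map]
  simp only [Function.comp_def, pvGet_cons_zero]
  rw [show ∀ (b : Bool) (X Y : List (List Int)),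
      (if (if b = true then (1:Int) else 0) > 0 then X else Y) = (if b = true then X else Y) from by
    intro b X Y; cases b <;> simp]

lemma any_congr_mem {α : Type} (l : List α) (p q : α → Bool) (h : ∀ x ∈ l, p x = q x) :
    l.any p = l.any q := by
  induction l with
  | nil => rfl
  | cons x t ih => simp only [List.any_cons, h x (by simp), ih (fun y hy => h y (by simp [hy]))]

lemma kids_fold (sales : List Int) (links : List (List Int))
    (hP : PreL (sales.length : Int) links) (hA : Acyc links) (g : Nat)
    (S : Finset Int) (v : Int) (hI : InvA links (sales.length : Int) S v)
    (IH : ∀ (S' : Finset Int) (u : Int) (dp : List (List Int)),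
      InvA links (sales.length : Int) S' u →
      (sales.length : Int) + 1 - S'.card ≤ (g : Int) → dp.length = sales.length + 1 →
      InvP sales links dp → ConclP sales links g u dp)
    (hfuel : (sales.length : Int) - S.card ≤ (g : Int)) :
    ∀ (cs : List Int), (∀ c ∈ cs, c ∈ kidsOf links v) →
    ∀ dp, dp.length = sales.length + 1 → InvP sales links dp →
      (cs.foldl (fun dp c => dfsA (tiOf sales links) (miOf sales) (ldOf sales links) g dp c) dp).length = sales.length + 1 ∧
      (∀ w, 1 ≤ w → w ≤ (sales.length : Int) →
        dpRowA (cs.foldl (fun dp c => dfsA (tiOf sales links) (miOf sales) (ldOf sales links) g dp c) dp) w = dpRowA dp w ∨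
        dpRowA (cs.foldl (fun dp c => dfsA (tiOf sales links) (miOf sales) (ldOf sales links) g dp c) dp) w = FL sales links w) ∧
      (∀ c ∈ cs, dpRowA (cs.foldl (fun dp c => dfsA (tiOf sales links) (miOf sales) (ldOf sales links) g dp c) dp) c = FL sales links c) := by
  intro cs
  induction cs with
  | nil =>
    intro _ dp hlen hinv
    exact ⟨hlen, fun w _ _ => Or.inl rfl, by simp⟩
  | cons c t ihcs =>
    intro hmem dp hlen hinv
    have hck := kid_bounds hP (hmem c (List.mem_cons_self))
    have hstep : (dfsA (tiOf sales links) (miOf sales) (ldOf sales links) g dp c).length = sales.length + 1 ∧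
        (∀ w, 1 ≤ w → w ≤ (sales.length : Int) →
          dpRowA (dfsA (tiOf sales links) (miOf sales) (ldOf sales links) g dp c) w = dpRowA dp w ∨
          dpRowA (dfsA (tiOf sales links) (miOf sales) (ldOf sales links) g dp c) w = FL sales links w) ∧
        dpRowA (dfsA (tiOf sales links) (miOf sales) (ldOf sales links) g dp c) c = FL sales links c := by
      by_cases hldc : isLd links c = true
      · have hI' := child_inv hP hA hI (hmem c (List.mem_cons_self))
        have hcardI : (insert v S).card = S.card + 1 := card_insert_inv hI.2.2.2.1
        have := IH (insert v S) c dp hI' (by rw [hcardI]; push_cast; push_cast at hfuel; omega)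
          hlen hinv
        rw [ConclP] at this
        exact this
      · have hfalse : isLd links c = false := by
          cases hh : isLd links c
          · rfl
          · exact absurd hh hldc
        rw [dfsA_nonleader _ _ _ c (by rw [ldOf_getD]; exact hfalse)]
        refine ⟨hlen, fun w _ _ => Or.inl rfl, ?_⟩
        rcases hinv c hck.1 hck.2 with h | h
        · rw [h, FL_nonleader hfalse]
        · exact h
    have hinvA : InvP sales links (dfsA (tiOf sales links) (miOf sales) (ldOf sales links) g dp c) := by
      intro w h1 h2
      rcases hstep.2.1 w h1 h2 with h | h
      · rw [h]; exact hinv w h1 h2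
      · exact Or.inr h
    have hrest := ihcs (fun c' hc' => hmem c' (List.mem_cons_of_mem c hc'))
      (dfsA (tiOf sales links) (miOf sales) (ldOf sales links) g dp c) hstep.1 hinvA
    simp only [List.foldl_cons]
    refine ⟨hrest.1, ?_, ?_⟩
    · intro w h1 h2
      rcases hrest.2.1 w h1 h2 with h | h
      · rcases hstep.2.1 w h1 h2 with h' | h'
        · exact Or.inl (h.trans h')
        · exact Or.inr (h.trans h')
      · exact Or.inr h
    · intro c' hc'
      rcases List.mem_cons.mp hc' with rfl | hc'
      · rcases hrest.2.1 c' hck.1 hck.2 with h | h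
        · rw [h, hstep.2.2]
        · exact h
      · exact hrest.2.2 c' hc'

lemma leader_compute (sales : List Int) (links : List (List Int))
    (hP : PreL (sales.length : Int) links) (hA : Acyc links) (v : Int)
    (hld : isLd links v = true) (hr : Reach1 links v)
    (hv1 : 1 ≤ v) (hv2 : v ≤ (sales.length : Int))
    (dp dp1 : List (List Int))
    (hdp1len : dp1.length = sales.length + 1)
    (hchain : ∀ w, 1 ≤ w → w ≤ (sales.length : Int) →
      dpRowA dp1 w = dpRowA dp w ∨ dpRowA dp1 w = FL sales links w)
    (hinv1 : InvP sales links dp1)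
    (hrows : ∀ c ∈ kidsOf links v, dpRowA dp1 c = FL sales links c)
    (S : Int) (hS : S = ((kidsOf links v).map (fun c => min (dpGetA dp1 c 0) (dpGetA dp1 c 1))).sum)
    (dp2 : List (List Int)) (hdp2 : dp2 = dpSetA dp1 v 1 (S + (miOf sales).getD v 0))
    (dp3 : List (List Int))
    (hdp3 : dp3 = if (kidsOf links v).any (fun c => decide (dpGetA dp2 c 0 > dpGetA dp2 c 1)) = true
        then dpSetA dp2 v 0 S
        else dpSetA dp2 v 0 (S + (PySem.List.min? ((kidsOf links v).map
          (fun c => dpGetA dp2 c 1 - dpGetA dp2 c 0)) (fun x => x)).getD 0)) :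
    dp3.length = sales.length + 1 ∧
    (∀ w, 1 ≤ w → w ≤ (sales.length : Int) →
      dpRowA dp3 w = dpRowA dp w ∨ dpRowA dp3 w = FL sales links w) ∧
    dpRowA dp3 v = FL sales links v := by
  have hvc : ∀ c ∈ kidsOf links v, c ≠ v := by
    intro c hc he
    subst he
    exact hA c hr (Relation.TransGen.single hc)
  obtain ⟨a, b, hab⟩ : ∃ a b, dpRowA dp1 v = [a, b] := by
    rcases hinv1 v hv1 hv2 with h | h
    · exact ⟨_, _, h⟩
    · rw [FL] at h; exact ⟨_, _, h⟩
  have hm : (miOf sales).getD v 0 = salesAt sales v := miOf_at sales v hv1 hv2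
  have hrow2 : ∀ w, 0 ≤ w → w < (sales.length : Int) + 1 →
      dpRowA dp2 w = if w = v then [a, S + (miOf sales).getD v 0] else dpRowA dp1 w := by
    intro w h1 h2
    rw [hdp2, dpRow_set dp1 v w 1 _ (by omega) (by rw [hdp1len]; push_cast; omega) h1
      (by rw [hdp1len]; push_cast; omega)]
    rw [hab, pySetD_pair_one]
  have hget1 : ∀ c ∈ kidsOf links v,
      dpGetA dp1 c 0 = (FF sales links c).1 ∧ dpGetA dp1 c 1 = (FF sales links c).2 := by
    intro c hc
    exact dpGet_row_pair dp1 c _ _ (by rw [hrows c hc, FL])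
  have hget2 : ∀ c ∈ kidsOf links v,
      dpGetA dp2 c 0 = (FF sales links c).1 ∧ dpGetA dp2 c 1 = (FF sales links c).2 := by
    intro c hc
    have hcb := kid_bounds hP hc
    have : dpRowA dp2 c = dpRowA dp1 c := by
      rw [hrow2 c (by omega) (by omega), if_neg (hvc c hc)]
    refine dpGet_row_pair dp2 c _ _ ?_
    rw [this, hrows c hc, FL]
  have hSmap : S = (((kidsOf links v).map (fun c => FF sales links c)).map (fun p => min p.1 p.2)).sum := by
    rw [hS, List.map_map]
    congr 1
    apply List.map_congr_left
    intro c hc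
    simp only [Function.comp_def]
    rw [(hget1 c hc).1, (hget1 c hc).2]
  have hany : ((kidsOf links v).any (fun c => decide (dpGetA dp2 c 0 > dpGetA dp2 c 1)))
      = (((kidsOf links v).map (fun c => FF sales links c)).any (fun p => decide (p.1 > p.2))) := by
    rw [List.any_map]
    apply any_congr_mem
    intro c hc
    simp only [Function.comp_def]
    rw [(hget2 c hc).1, (hget2 c hc).2]
  have hdelta : ((kidsOf links v).map (fun c => dpGetA dp2 c 1 - dpGetA dp2 c 0))
      = ((kidsOf links v).map (fun c => FF sales links c)).map (fun p => p.2 - p.1) := by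
    rw [List.map_map]
    apply List.map_congr_left
    intro c hc
    simp only [Function.comp_def]
    rw [(hget2 c hc).1, (hget2 c hc).2]
  have hFF := FF_leader hP hA hld hr hv1 hv2
  simp only at hFF
  -- the two written rows of dp3
  have hrow3 : ∀ X, ∀ w, 0 ≤ w → w < (sales.length : Int) + 1 →
      dpRowA (dpSetA dp2 v 0 X) w
        = if w = v then [X, S + (miOf sales).getD v 0] else dpRowA dp1 w := by
    intro X w h1 h2
    have hlen2 : dp2.length = sales.length + 1 := by rw [hdp2, length_dpSetA, hdp1len]
    rw [dpRow_set dp2 v w 0 _ (by omega) (by rw [hlen2]; push_cast; omega) h1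
      (by rw [hlen2]; push_cast; omega)]
    rw [hrow2 v (by omega) (by omega), if_pos rfl, pySetD_pair_zero]
    by_cases hw : w = v
    · simp [hw]
    · rw [if_neg hw, if_neg hw, hrow2 w h1 h2, if_neg hw]
  have hlen3 : dp3.length = sales.length + 1 := by
    rw [hdp3]
    split <;> rw [length_dpSetA, hdp2, length_dpSetA, hdp1len]
  -- dp3 as a single write whose row is FL v
  obtain ⟨X, hX, hXval⟩ : ∃ X, dp3 = dpSetA dp2 v 0 X ∧
      [X, S + salesAt sales v] = FL sales links v := by
    by_cases hB : (((kidsOf links v).map (fun c => FF sales links c)).any (fun p => decide (p.1 > p.2))) = true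
    · refine ⟨S, by rw [hdp3, hany, if_pos hB], ?_⟩
      rw [FL, hFF]
      simp only [hB, if_true]
      rw [hSmap, salesAt]
    · have hBf : (((kidsOf links v).map (fun c => FF sales links c)).any (fun p => decide (p.1 > p.2))) = false := by
        cases hh : (((kidsOf links v).map (fun c => FF sales links c)).any (fun p => decide (p.1 > p.2)))
        · rfl
        · exact absurd hh hB
      refine ⟨S + (PySem.List.min? ((kidsOf links v).map
          (fun c => dpGetA dp2 c 1 - dpGetA dp2 c 0)) (fun x => x)).getD 0, ?_, ?_⟩
      · rw [hdp3, hany, hBf]; simp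
      · rw [FL, hFF]
        simp only [hBf, Bool.false_eq_true, if_false]
        rw [hdelta, hSmap, salesAt]
  refine ⟨hlen3, ?_, ?_⟩
  · intro w h1 h2
    by_cases hw : w = v
    · right
      rw [hw, hX, hrow3 X v (by omega) (by omega), if_pos rfl, hm, hXval]
    · rw [hX, hrow3 X w (by omega) (by omega), if_neg hw]
      exact hchain w h1 h2
  · rw [hX, hrow3 X v (by omega) (by omega), if_pos rfl, hm, hXval]

lemma dpInit0_len (sales : List Int) : (dpInit0 sales).length = sales.length := by
  rw [dpInit0, PySem.List.pyRange_zero_natCast]; simp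

lemma dpInit_row (sales : List Int) (v : Int) (h1 : 1 ≤ v) (h2 : v ≤ (sales.length : Int)) :
    dpRowA ([0, 0] :: dpInit0 sales) v = [0, salesAt sales v] := by
  rw [dpRow_cons _ _ v h1, dpInit0]
  rw [PySem.List.pyGetD_map_pyRange_of_nonneg (fun i => [0, (miOf sales).getD (i + 1) 0])
    (sales.length : Int) (v - 1) [] (by omega) (by omega)]
  rw [show v - 1 + 1 = v from by omega, miOf_at sales v h1 h2]

lemma dfs_main (sales : List Int) (links : List (List Int))
    (hP : PreL (sales.length : Int) links) (hA : Acyc links) :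
    ∀ (fuel : Nat) (S : Finset Int) (v : Int) (dp : List (List Int)),
    InvA links (sales.length : Int) S v →
    (sales.length : Int) + 1 - S.card ≤ (fuel : Int) → dp.length = sales.length + 1 →
    InvP sales links dp → ConclP sales links fuel v dp := by
  intro fuel
  induction fuel with
  | zero =>
    intro S v dp hI h3 _ _
    exfalso
    have hcard := card_le_of_bounds S hI.2.2.2.2.1 (by positivity)
    simp at h3
    omega
  | succ g ih =>
    intro S v dp hI hfv hlen hinv
    have hv1 := hI.2.1
    have hv2 := hI.2.2.1
    by_cases hld : isLd links v = true
    · have hkf := kids_fold sales links hP hA g S v hI ih (by push_cast at hfv ⊢; omega)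
        (kidsOf links v) (fun c hc => hc) dp hlen hinv
      have hinv1 : InvP sales links
          ((kidsOf links v).foldl
            (fun dp c => dfsA (tiOf sales links) (miOf sales) (ldOf sales links) g dp c) dp) := by
        intro w h1 h2
        rcases hkf.2.1 w h1 h2 with h | h
        · rw [h]; exact hinv w h1 h2
        · exact Or.inr h
      rw [ConclP, dfsA_leader sales links g dp v hld]
      exact leader_compute sales links hP hA v hld hI.1 hv1 hv2 dp _ hkf.1 hkf.2.1 hinv1 hkf.2.2
        _ rfl _ rfl _ rfl
    · have hfalse : isLd links v = false := by
        cases hh : isLd links v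
        · rfl
        · exact absurd hh hld
      rw [ConclP, dfsA_nonleader _ _ _ v (by rw [ldOf_getD]; exact hfalse)]
      refine ⟨hlen, fun w _ _ => Or.inl rfl, ?_⟩
      rcases hinv v hv1 hv2 with h | h
      · rw [h, FL_nonleader hfalse]
      · exact h

-- ===== B-side proofs =====

-- proof-level name for B's children dict
def chOf (links : List (List Int)) : PySem.Dict Int (List Int) :=
  links.foldl (fun d l => d.insert (pvGet l 0) (d.getD (pvGet l 0) [] ++ [pvGet l 1])) PySem.Dict.empty

lemma ch_getD (links : List (List Int)) (v : Int) :
    (chOf links).getD v [] = kidsOf links v := by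
  have := getD_foldl_insert_append (fun l => pvGet l 0) (fun l => pvGet l 1) links
    PySem.Dict.empty v
  simpa [chOf, kidsOf] using this

lemma ch_contains (links : List (List Int)) (v : Int) :
    (chOf links).contains v = isLd links v := by
  have := contains_foldl_insert (fun l => pvGet l 0)
    (fun d l => d.getD (pvGet l 0) [] ++ [pvGet l 1]) links PySem.Dict.empty v
  simpa [chOf, isLd] using this

lemma nodup_keys_foldl_insert {ν : Type} (key : List Int → Int)
    (f : PySem.Dict Int ν → List Int → ν) :
    ∀ (ls : List (List Int)) (d : PySem.Dict Int ν), d.keys.Nodup →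
    (ls.foldl (fun d l => d.insert (key l) (f d l)) d).keys.Nodup := by
  intro ls
  induction ls with
  | nil => intro d h; exact h
  | cons l t ih =>
    intro d h
    exact ih _ (PySem.Dict.nodup_keys_insert d (key l) (f d l) h)

lemma ch_keys_nodup (links : List (List Int)) : (chOf links).keys.Nodup := by
  exact nodup_keys_foldl_insert (fun l => pvGet l 0)
    (fun d l => d.getD (pvGet l 0) [] ++ [pvGet l 1]) links PySem.Dict.empty
    (by simp [PySem.Dict.nodup_keys_empty])

lemma ch_item_fact {links : List (List Int)} {v : Int} {kids : List Int}
    (h : (v, kids) ∈ (chOf links).items) :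
    isLd links v = true ∧ kids = kidsOf links v := by
  have hget := PySem.Dict.get?_of_mem_items _ h (ch_keys_nodup links)
  have hcont : (chOf links).contains v = true := by
    rw [PySem.Dict.contains_eq_isSome_get?, hget]; rfl
  have hgd : (chOf links).getD v [] = kids := PySem.Dict.getD_of_get?_eq_some _ [] hget
  rw [ch_getD] at hgd
  exact ⟨by rw [← ch_contains]; exact hcont, hgd.symm⟩

lemma ch_item_of_isLd {links : List (List Int)} {v : Int} (h : isLd links v = true) :
    (v, kidsOf links v) ∈ (chOf links).items := by
  have hcont : (chOf links).contains v = true := by rw [ch_contains]; exact h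
  have hk : v ∈ (chOf links).keys := (PySem.Dict.contains_iff_mem_keys _ _).mp hcont
  have := PySem.Dict.items_eq_map_keys (chOf links) (ch_keys_nodup links) []
  rw [this, List.mem_map]
  exact ⟨v, hk, by rw [ch_getD]⟩

-- ---- B's reach loop computes exactly reachability from 1 ----
lemma mem_newNodesB (links : List (List Int)) (r : List Int) (x : Int) :
    x ∈ newNodesB (chOf links) r ↔ (∃ u ∈ r, x ∈ kidsOf links u) ∧ x ∉ r := by
  rw [newNodesB]
  have main : ∀ (its : List (Int × List Int)) (acc : List Int),
      x ∈ its.foldl (fun acc vk =>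
        if PySem.Set.contains r vk.1 then acc ++ vk.2.filter (fun c => !PySem.Set.contains r c)
        else acc) acc
      ↔ x ∈ acc ∨ ∃ vk ∈ its, PySem.Set.contains r vk.1 = true ∧ x ∈ vk.2 ∧ x ∉ r := by
    intro its
    induction its with
    | nil => simp
    | cons vk t ih =>
      intro acc
      simp only [List.foldl_cons, List.mem_cons]
      by_cases h : PySem.Set.contains r vk.1 = true
      · rw [if_pos h, ih]
        simp only [List.mem_append, List.mem_filter, Bool.not_eq_true',
          PySem.Set.contains_eq_listContains]
        constructor
        · rintro (⟨hx | ⟨hx, hnr⟩⟩ | ⟨w, hw, hc, hx, hnr⟩)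
          · exact Or.inl hx
          · exact Or.inr ⟨vk, Or.inl rfl, h, hx, by simpa using hnr⟩
          · exact Or.inr ⟨w, Or.inr hw, hc, hx, hnr⟩
        · rintro (hx | ⟨w, (rfl | hw), hc, hx, hnr⟩)
          · exact Or.inl (Or.inl hx)
          · exact Or.inl (Or.inr ⟨hx, by simpa using hnr⟩)
          · exact Or.inr ⟨w, hw, hc, hx, hnr⟩
      · rw [if_neg h, ih]
        constructor
        · rintro (hx | ⟨w, hw, hc, hx, hnr⟩)
          · exact Or.inl hx
          · exact Or.inr ⟨w, Or.inr hw, hc, hx, hnr⟩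
        · rintro (hx | ⟨w, (rfl | hw), hc, hx, hnr⟩)
          · exact Or.inl hx
          · exact absurd hc h
          · exact Or.inr ⟨w, hw, hc, hx, hnr⟩
  rw [main]
  simp only [List.mem_nil_iff, false_or]
  constructor
  · rintro ⟨vk, hvk, hc, hx, hnr⟩
    have hfact := ch_item_fact (links := links) (v := vk.1) (kids := vk.2) (by exact hvk)
    exact ⟨⟨vk.1, (PySem.Set.contains_iff _ _).mp hc, hfact.2 ▸ hx⟩, hnr⟩
  · rintro ⟨⟨u, hu, hx⟩, hnr⟩
    have hld := isLd_of_kid hx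
    exact ⟨(u, kidsOf links u), ch_item_of_isLd hld, (PySem.Set.contains_iff _ _).mpr hu, hx, hnr⟩

def RInv (links : List (List Int)) (r : List Int) : Prop :=
  (1 : Int) ∈ r ∧ r.Nodup ∧ (∀ x ∈ r, Reach1 links x) ∧
  (∀ x ∈ r, x = 1 ∨ x ∈ targetsOf links)

lemma reachLoopB_main (links : List (List Int)) :
    ∀ (f : Nat) (r : List Int), RInv links r →
    ((links.length : Int) + 2 - r.length ≤ (f : Int)) →
    RInv links (reachLoopB (chOf links) f r) ∧
      newNodesB (chOf links) (reachLoopB (chOf links) f r) = [] := by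
  intro f
  induction f with
  | zero =>
    intro r hR hf
    exfalso
    have hlen := length_le_of_nodup_subset hR.2.1
      (fun x hx => by
        rcases hR.2.2.2 x hx with rfl | hx
        · exact List.mem_cons_self
        · exact List.mem_cons_of_mem _ hx)
      (u := 1 :: targetsOf links)
    have h1 := (List.dedup_sublist ((1 : Int) :: targetsOf links)).length_le
    have h2 : ((1 : Int) :: targetsOf links).length = 1 + links.length := by
      simp [targetsOf]
      omega
    push_cast at hf
    omega
  | succ g ih =>
    intro r hR hf
    rw [reachLoopB]
    by_cases hnw : newNodesB (chOf links) r = []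
    · simp only [hnw, if_pos rfl]
      exact ⟨hR, hnw⟩
    · simp only [hnw, if_neg hnw]
      obtain ⟨x0, hx0⟩ := List.exists_mem_of_ne_nil _ hnw
      have hx0f := (mem_newNodesB links r x0).mp hx0
      have hR' : RInv links (PySem.Set.update r (newNodesB (chOf links) r)) := by
        refine ⟨(PySem.Set.mem_update _ _ _).mpr (Or.inl hR.1), PySem.Set.nodup_update _ _ hR.2.1, ?_, ?_⟩
        · intro x hx
          rcases (PySem.Set.mem_update _ _ _).mp hx with hx | hx
          · exact hR.2.2.1 x hx
          · obtain ⟨⟨u, hu, hk⟩, _⟩ := (mem_newNodesB links r x).mp hx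
            exact (hR.2.2.1 u hu).tail hk
        · intro x hx
          rcases (PySem.Set.mem_update _ _ _).mp hx with hx | hx
          · exact hR.2.2.2 x hx
          · obtain ⟨⟨u, _, hk⟩, _⟩ := (mem_newNodesB links r x).mp hx
            exact Or.inr (kid_mem_targets hk)
      have hgrow : r.length + 1 ≤ (PySem.Set.update r (newNodesB (chOf links) r)).length := by
        have hcons : (x0 :: r).Nodup := List.nodup_cons.mpr ⟨hx0f.2, hR.2.1⟩
        have hsub : (x0 :: r) ⊆ PySem.Set.update r (newNodesB (chOf links) r) := by
          intro y hy
          rcases List.mem_cons.mp hy with rfl | hy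
          · exact (PySem.Set.mem_update _ _ _).mpr (Or.inr hx0)
          · exact (PySem.Set.mem_update _ _ _).mpr (Or.inl hy)
        simpa using (hcons.subperm hsub).length_le
      have := ih _ hR' (by push_cast at hf ⊢; omega)
      exact this

lemma mem_reachB_iff (links : List (List Int)) (x : Int) :
    x ∈ reachLoopB (chOf links) (links.length + 1) (PySem.Set.ofList [1]) ↔ Reach1 links x := by
  have h0 : RInv links (PySem.Set.ofList [1]) := by
    refine ⟨by simp [PySem.Set.mem_ofList], PySem.Set.nodup_ofList _, ?_, ?_⟩
    · intro x hx
      rw [PySem.Set.mem_ofList] at hx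
      simp at hx
      subst hx
      exact Relation.ReflTransGen.refl
    · intro x hx
      rw [PySem.Set.mem_ofList] at hx
      simp at hx
      exact Or.inl hx
  have hlen1 : (PySem.Set.ofList ([1] : List Int)).length = 1 := rfl
  have hmain := reachLoopB_main links (links.length + 1) (PySem.Set.ofList [1]) h0
    (by rw [hlen1]; push_cast; omega)
  set R := reachLoopB (chOf links) (links.length + 1) (PySem.Set.ofList [1]) with hRdef
  constructor
  · intro hx
    exact hmain.1.2.2.1 x hx
  · intro hx
    -- R is closed under kids (no new nodes) and contains 1
    have hclosed : ∀ u ∈ R, ∀ c ∈ kidsOf links u, c ∈ R := by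
      intro u hu c hc
      by_contra hcR
      have : c ∈ newNodesB (chOf links) R := (mem_newNodesB links R c).mpr ⟨⟨u, hu, hc⟩, hcR⟩
      rw [hmain.2] at this
      exact absurd this (List.not_mem_nil)
    have h1R : (1 : Int) ∈ R := hmain.1.1
    clear hmain
    induction hx with
    | refl => exact h1R
    | tail _ hE ihx =>
      rename_i b c _
      exact hclosed b ihx c hE

-- ---- B's readiness sweeps ----
def CorrectSv (sales : List Int) (links : List (List Int))
    (sv : PySem.Dict Int (Int × Int)) : Prop :=
  ∀ v p, sv.get? v = some p → isLd links v = true ∧ p = FF sales links v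

-- one item of the sweep, named for the proofs (roundB is the fold of this step)
def stepSv (ch : PySem.Dict Int (List Int)) (sales : List Int) (reach : PySem.Set Int)
    (sv : PySem.Dict Int (Int × Int)) (vk : Int × List Int) : PySem.Dict Int (Int × Int) :=
  if !PySem.Set.contains reach vk.1 || sv.contains vk.1 then sv
  else if vk.2.any (fun c => ch.contains c && !sv.contains c) then sv
  else
    let pairs := vk.2.map (fun c => bpairB ch sales sv c)
    let total := (pairs.map (fun p => min p.1 p.2)).sum
    let absent := if pairs.any (fun p => decide (p.1 > p.2)) then total
      else total + (PySem.List.min? (pairs.map (fun p => p.2 - p.1)) (fun x => x)).getD 0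
    sv.insert vk.1 (absent, total + pvGet sales (vk.1 - 1))

lemma roundB_eq (ch : PySem.Dict Int (List Int)) (sales : List Int) (reach : PySem.Set Int)
    (sv : PySem.Dict Int (Int × Int)) :
    roundB ch sales reach sv = ch.items.foldl (stepSv ch sales reach) sv := rfl

lemma stepSv_mono (ch : PySem.Dict Int (List Int)) (sales : List Int) (reach : PySem.Set Int)
    (sv : PySem.Dict Int (Int × Int)) (vk : Int × List Int) (w : Int) (p : Int × Int)
    (h : sv.get? w = some p) : (stepSv ch sales reach sv vk).get? w = some p := by
  rw [stepSv]
  split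
  · exact h
  · split
    · exact h
    · rename_i h1 _
      have hcont : sv.contains vk.1 = false := by
        cases hh : sv.contains vk.1
        · rfl
        · exact absurd (by rw [hh]; simp : (!PySem.Set.contains reach vk.1 || sv.contains vk.1) = true) h1
      have hne : w ≠ vk.1 := by
        intro he
        subst he
        rw [PySem.Dict.contains_eq_isSome_get?, h] at hcont
        simp at hcont
      rw [PySem.Dict.get?_insert, if_neg hne]
      exact h

lemma stepSv_contains_mono (ch : PySem.Dict Int (List Int)) (sales : List Int)
    (reach : PySem.Set Int) (sv : PySem.Dict Int (Int × Int)) (vk : Int × List Int) (w : Int)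
    (h : sv.contains w = true) : (stepSv ch sales reach sv vk).contains w = true := by
  rw [PySem.Dict.contains_eq_isSome_get?] at h
  obtain ⟨p, hp⟩ : ∃ p, sv.get? w = some p := by
    cases hg : sv.get? w
    · rw [hg] at h; simp at h
    · exact ⟨_, rfl⟩
  rw [PySem.Dict.contains_eq_isSome_get?, stepSv_mono ch sales reach sv vk w p hp]
  rfl

lemma foldl_stepSv_contains_mono (ch : PySem.Dict Int (List Int)) (sales : List Int)
    (reach : PySem.Set Int) :
    ∀ (its : List (Int × List Int)) (sv : PySem.Dict Int (Int × Int)) (w : Int),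
    sv.contains w = true → (its.foldl (stepSv ch sales reach) sv).contains w = true := by
  intro its
  induction its with
  | nil => intro sv w h; exact h
  | cons vk t ih =>
    intro sv w h
    exact ih _ w (stepSv_contains_mono ch sales reach sv vk w h)

lemma bpair_eq_FF {sales : List Int} {links : List (List Int)}
    {sv : PySem.Dict Int (Int × Int)} (hC : CorrectSv sales links sv) {c : Int}
    (hsolved : (chOf links).contains c = true → sv.contains c = true) :
    bpairB (chOf links) sales sv c = FF sales links c := by
  rw [bpairB]
  by_cases h : (chOf links).contains c = true
  · rw [if_pos h]
    have hc := hsolved h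
    rw [PySem.Dict.contains_eq_isSome_get?] at hc
    obtain ⟨q, hq⟩ : ∃ q, sv.get? c = some q := by
      cases hg : sv.get? c
      · rw [hg] at hc; simp at hc
      · exact ⟨_, rfl⟩
    rw [hq]
    simp only [Option.getD_some]
    exact (hC c q hq).2
  · have hf : (chOf links).contains c = false := by
      cases hh : (chOf links).contains c
      · rfl
      · exact absurd hh h
    rw [if_neg h, ← FF_nonleader (show isLd links c = false from by rw [← ch_contains]; exact hf)]

lemma stepSv_correct (sales : List Int) (links : List (List Int))
    (hP : PreL (sales.length : Int) links) (hA : Acyc links) (hn : 1 ≤ (sales.length : Int))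
    (reach : PySem.Set Int) (hreach : ∀ x, PySem.Set.contains reach x = true → Reach1 links x)
    (sv : PySem.Dict Int (Int × Int)) (hC : CorrectSv sales links sv)
    (vk : Int × List Int) (hvk : vk ∈ (chOf links).items) :
    CorrectSv sales links (stepSv (chOf links) sales reach sv vk) := by
  rw [stepSv]
  split
  · exact hC
  · split
    · exact hC
    · rename_i h1 h2
      have hr1 : PySem.Set.contains reach vk.1 = true := by
        cases hh : PySem.Set.contains reach vk.1
        · exact absurd (by rw [hh]; simp : (!PySem.Set.contains reach vk.1 || sv.contains vk.1) = true) h1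
        · rfl
      have h2' : ∀ c ∈ vk.2, (chOf links).contains c = true → sv.contains c = true := by
        intro c hc hcont
        by_contra hns
        have hns' : sv.contains c = false := by
          cases hh : sv.contains c
          · rfl
          · exact absurd hh hns
        exact h2 (List.any_eq_true.mpr ⟨c, hc, by rw [hcont, hns']; rfl⟩)
      obtain ⟨hld, hkids⟩ := ch_item_fact hvk
      have hreach1 : Reach1 links vk.1 := hreach vk.1 hr1
      have hb := reach_bounds hP hn hreach1
      have hpairs : vk.2.map (fun c => bpairB (chOf links) sales sv c)
          = (kidsOf links vk.1).map (fun c => FF sales links c) := by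
        rw [hkids]
        apply List.map_congr_left
        intro c hc
        exact bpair_eq_FF hC (h2' c (hkids ▸ hc))
      have hFF := FF_leader hP hA hld hreach1 hb.1 hb.2
      simp only at hFF
      intro v p hget
      rw [PySem.Dict.get?_insert] at hget
      by_cases hv : v = vk.1
      · rw [if_pos hv] at hget
        have hpv := Option.some_injective _ hget
        subst hv
        refine ⟨hld, ?_⟩
        rw [← hpv, hFF, hpairs]
      · rw [if_neg hv] at hget
        exact hC v p hget

lemma roundB_correct (sales : List Int) (links : List (List Int))
    (hP : PreL (sales.length : Int) links) (hA : Acyc links) (hn : 1 ≤ (sales.length : Int))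
    (reach : PySem.Set Int) (hreach : ∀ x, PySem.Set.contains reach x = true → Reach1 links x)
    (sv : PySem.Dict Int (Int × Int)) (hC : CorrectSv sales links sv) :
    CorrectSv sales links (roundB (chOf links) sales reach sv) := by
  rw [roundB_eq]
  have main : ∀ (its : List (Int × List Int)), (∀ vk ∈ its, vk ∈ (chOf links).items) →
      ∀ (sv : PySem.Dict Int (Int × Int)), CorrectSv sales links sv →
      CorrectSv sales links (its.foldl (stepSv (chOf links) sales reach) sv) := by
    intro its
    induction its with
    | nil => intro _ sv hC; exact hC
    | cons vk t ih =>
      intro hmem sv hC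
      exact ih (fun x hx => hmem x (List.mem_cons_of_mem vk hx)) _
        (stepSv_correct sales links hP hA hn reach hreach sv hC vk (hmem vk List.mem_cons_self))
  exact main _ (fun vk hvk => hvk) sv hC

lemma roundB_contains_mono (links : List (List Int)) (sales : List Int)
    (reach : PySem.Set Int) (sv : PySem.Dict Int (Int × Int)) (w : Int)
    (h : sv.contains w = true) :
    (roundB (chOf links) sales reach sv).contains w = true := by
  rw [roundB_eq]
  exact foldl_stepSv_contains_mono (chOf links) sales reach _ sv w h

lemma roundB_solves (links : List (List Int)) (sales : List Int) (reach : PySem.Set Int)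
    (sv : PySem.Dict Int (Int × Int)) (v : Int)
    (hld : isLd links v = true) (hrv : PySem.Set.contains reach v = true)
    (hkids : ∀ c ∈ kidsOf links v, (chOf links).contains c = true → sv.contains c = true) :
    (roundB (chOf links) sales reach sv).contains v = true := by
  rw [roundB_eq]
  have hitem : (v, kidsOf links v) ∈ (chOf links).items := ch_item_of_isLd hld
  have main : ∀ (its : List (Int × List Int)) (acc : PySem.Dict Int (Int × Int)),
      (v, kidsOf links v) ∈ its →
      (∀ c, sv.contains c = true → acc.contains c = true) →
      (its.foldl (stepSv (chOf links) sales reach) acc).contains v = true := by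
    intro its
    induction its with
    | nil => intro acc h; simp at h
    | cons vk t ih =>
      intro acc hmem hsub
      rcases List.mem_cons.mp hmem with heq | hmem'
      · -- the item for v itself: after this step v is solved (or already was)
        have hstep : (stepSv (chOf links) sales reach acc vk).contains v = true := by
          rw [← heq]
          rw [stepSv]
          by_cases hc1 : acc.contains v = true
          · split
            · exact hc1
            · split
              · exact hc1
              · rw [PySem.Dict.contains_insert]
                simp
          · have hc1' : acc.contains v = false := by
              cases hh : acc.contains v
              · rfl
              · exact absurd hh hc1
            have hcond1 : (!PySem.Set.contains reach v || acc.contains v) = false := by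
              rw [hrv, hc1']; rfl
            rw [if_neg (by rw [hcond1]; simp)]
            have hcond2 : ((kidsOf links v).any (fun c => (chOf links).contains c && !acc.contains c)) = false := by
              rw [List.any_eq_false]
              intro c hc
              by_cases hcc : (chOf links).contains c = true
              · have := hsub c (hkids c hc hcc)
                rw [hcc, this]
                simp
              · have : (chOf links).contains c = false := by
                  cases hh : (chOf links).contains c
                  · rfl
                  · exact absurd hh hcc
                rw [this]
                simp
            rw [if_neg (by rw [hcond2]; simp)]
            rw [PySem.Dict.contains_insert]
            simp
        exact foldl_stepSv_contains_mono (chOf links) sales reach t _ v hstep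
      · refine ih _ hmem' ?_
        intro c hc
        exact stepSv_contains_mono (chOf links) sales reach acc vk c (hsub c hc)
  exact main _ sv hitem (fun c hc => hc)

lemma sink_exists (links : List (List Int))
    (h3 : ∀ v ∈ reachS links, v ∉ descS links v)
    (sv : PySem.Dict Int (Int × Int)) :
    ∀ (k : Nat) (v : Int),
      (((descS links v).toFinset.filter
        (fun u => isLd links u = true ∧ sv.contains u = false)).card ≤ k) →
      Reach1 links v → isLd links v = true → sv.contains v = false →
      ∃ w, Reach1 links w ∧ isLd links w = true ∧ sv.contains w = false ∧
        ∀ c ∈ kidsOf links w, isLd links c = true → sv.contains c = true := by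
  intro k
  induction k with
  | zero =>
    intro v hcard hr hld huns
    by_cases hall : ∀ c ∈ kidsOf links v, isLd links c = true → sv.contains c = true
    · exact ⟨v, hr, hld, huns, hall⟩
    · exfalso
      push_neg at hall
      obtain ⟨c, hc, hcld, hcuns⟩ := hall
      have hcuns' : sv.contains c = false := by
        cases hh : sv.contains c
        · rfl
        · exact absurd hh hcuns
      have hcmem : c ∈ (descS links v).toFinset.filter
          (fun u => isLd links u = true ∧ sv.contains u = false) := by
        rw [Finset.mem_filter, List.mem_toFinset]
        exact ⟨subset_iterR links _ _ c ((PySem.Set.mem_ofList _ _).mpr hc), hcld, hcuns'⟩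
      have := Finset.card_pos.mpr ⟨c, hcmem⟩
      omega
  | succ k ih =>
    intro v hcard hr hld huns
    by_cases hall : ∀ c ∈ kidsOf links v, isLd links c = true → sv.contains c = true
    · exact ⟨v, hr, hld, huns, hall⟩
    · push_neg at hall
      obtain ⟨c, hc, hcld, hcuns⟩ := hall
      have hcuns' : sv.contains c = false := by
        cases hh : sv.contains c
        · rfl
        · exact absurd hh hcuns
      have hrc : Reach1 links c := hr.tail hc
      have hcmemv : c ∈ (descS links v).toFinset.filter
          (fun u => isLd links u = true ∧ sv.contains u = false) := by
        rw [Finset.mem_filter, List.mem_toFinset]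
        exact ⟨subset_iterR links _ _ c ((PySem.Set.mem_ofList _ _).mpr hc), hcld, hcuns'⟩
      have hsubset : (descS links c).toFinset.filter
            (fun u => isLd links u = true ∧ sv.contains u = false)
          ⊆ (descS links v).toFinset.filter
            (fun u => isLd links u = true ∧ sv.contains u = false) := by
        intro u hu
        rw [Finset.mem_filter, List.mem_toFinset] at hu ⊢
        refine ⟨?_, hu.2⟩
        exact descS_complete ((Relation.TransGen.single hc).trans (descS_sound hu.1))
      have hnotc : c ∉ (descS links c).toFinset.filter
          (fun u => isLd links u = true ∧ sv.contains u = false) := by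
        rw [Finset.mem_filter, List.mem_toFinset]
        rintro ⟨hcc, _⟩
        exact h3 c (reachS_complete hrc) hcc
      have hss : (descS links c).toFinset.filter
            (fun u => isLd links u = true ∧ sv.contains u = false)
          ⊂ (descS links v).toFinset.filter
            (fun u => isLd links u = true ∧ sv.contains u = false) :=
        (Finset.ssubset_iff_of_subset hsubset).mpr ⟨c, hcmemv, hnotc⟩
      have hlt := Finset.card_lt_card hss
      exact ih c (by omega) hrc hcld hcuns'

def RUF (links : List (List Int)) (sv : PySem.Dict Int (Int × Int)) : Finset Int :=
  (reachS links).toFinset.filter (fun u => isLd links u = true ∧ sv.contains u = false)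

lemma mem_RUF {links : List (List Int)} {sv : PySem.Dict Int (Int × Int)} {u : Int} :
    u ∈ RUF links sv ↔ Reach1 links u ∧ isLd links u = true ∧ sv.contains u = false := by
  rw [RUF, Finset.mem_filter, List.mem_toFinset]
  constructor
  · rintro ⟨h, h2, hc⟩
    exact ⟨reachS_sound h, h2, hc⟩
  · rintro ⟨h, h2, hc⟩
    exact ⟨reachS_complete h, h2, hc⟩

lemma loopB_main (sales : List Int) (links : List (List Int))
    (hP : PreL (sales.length : Int) links) (hA : Acyc links) (hn : 1 ≤ (sales.length : Int))
    (h3 : ∀ v ∈ reachS links, v ∉ descS links v)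
    (reach : PySem.Set Int) (hreach : ∀ x, PySem.Set.contains reach x = true ↔ Reach1 links x) :
    ∀ (f : Nat) (sv : PySem.Dict Int (Int × Int)), CorrectSv sales links sv →
    (RUF links sv).card ≤ f →
    CorrectSv sales links (loopB (chOf links) sales reach f sv) ∧
      ((chOf links).contains 1 = true →
        (loopB (chOf links) sales reach f sv).contains 1 = true) := by
  intro f
  induction f with
  | zero =>
    intro sv hC hcard
    rw [loopB]
    refine ⟨hC, ?_⟩
    intro h1
    by_contra hns
    have hns' : sv.contains 1 = false := by
      cases hh : sv.contains 1
      · rfl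
      · exact absurd hh hns
    have hm : (1 : Int) ∈ RUF links sv := mem_RUF.mpr
      ⟨Relation.ReflTransGen.refl, by rw [← ch_contains]; exact h1, hns'⟩
    have := Finset.card_pos.mpr ⟨1, hm⟩
    omega
  | succ f ih =>
    intro sv hC hcard
    rw [loopB]
    by_cases hcond : ((chOf links).contains 1 && !sv.contains 1) = true
    · rw [if_pos hcond]
      have hld1 : isLd links 1 = true := by
        rw [← ch_contains]
        have h12 : (chOf links).contains 1 = true ∧ (!sv.contains 1) = true := by
          simpa using hcond
        exact h12.1
      have huns1 : sv.contains 1 = false := by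
        have h12 : (chOf links).contains 1 = true ∧ (!sv.contains 1) = true := by
          simpa using hcond
        have h := h12.2
        cases hh : sv.contains 1
        · rfl
        · rw [hh] at h; exact absurd h (by simp)
      obtain ⟨w, hrw, hwld, hwuns, hwkids⟩ := sink_exists links h3 sv
        (((descS links 1).toFinset.filter
          (fun u => isLd links u = true ∧ sv.contains u = false)).card) 1 le_rfl
        Relation.ReflTransGen.refl hld1 huns1
      have hsolved : (roundB (chOf links) sales reach sv).contains w = true :=
        roundB_solves links sales reach sv w hwld ((hreach w).mpr hrw)
          (fun c hc hcc => hwkids c hc (by rw [← ch_contains]; exact hcc))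
      have hC' : CorrectSv sales links (roundB (chOf links) sales reach sv) :=
        roundB_correct sales links hP hA hn reach (fun x hx => (hreach x).mp hx) sv hC
      have hsub : RUF links (roundB (chOf links) sales reach sv) ⊆ RUF links sv := by
        intro u hu
        rw [mem_RUF] at hu ⊢
        refine ⟨hu.1, hu.2.1, ?_⟩
        by_contra hc
        have hc' : sv.contains u = true := by
          cases hh : sv.contains u
          · exact absurd hh hc
          · rfl
        rw [roundB_contains_mono links sales reach sv u hc'] at hu
        exact absurd hu.2.2 (by simp)
      have hwin : w ∈ RUF links sv := mem_RUF.mpr ⟨hrw, hwld, hwuns⟩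
      have hwout : w ∉ RUF links (roundB (chOf links) sales reach sv) := by
        rw [mem_RUF]
        rintro ⟨_, _, hcf⟩
        rw [hsolved] at hcf
        exact absurd hcf (by simp)
      have hss : RUF links (roundB (chOf links) sales reach sv) ⊂ RUF links sv :=
        (Finset.ssubset_iff_of_subset hsub).mpr ⟨w, hwin, hwout⟩
      have hlt := Finset.card_lt_card hss
      exact ih _ hC' (by omega)
    · rw [if_neg hcond]
      refine ⟨hC, ?_⟩
      intro h1
      cases hh : sv.contains 1
      · exact absurd (by rw [h1, hh]; rfl) hcond
      · rfl

-- unfolding solution_alt to the proof-level names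
lemma solution_alt_eq (sales : List Int) (links : List (List Int)) :
    solution_alt sales links
      = (let reach := reachLoopB (chOf links) (links.length + 1) (PySem.Set.ofList [1])
         let sv := loopB (chOf links) sales reach (links.length + 1) PySem.Dict.empty
         let p := if (chOf links).contains 1 then (sv.get? 1).getD (0, 0)
                  else (0, pvGet sales (1 - 1))
         min p.1 p.2) := rfl

-- ===== VERDICT (by name: the statement is the Claim_ definition above) =====

theorem solution_spec : Claim_equal_solution := by
  unfold Claim_equal_solution
  intro sales links _ hpre
  rw [Spec_solution]
  obtain ⟨hne, hP, h3⟩ := hpre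
  have hA : Acyc links := acyc_of_pre h3
  have hn : 1 ≤ (sales.length : Int) := by
    have := List.length_pos_of_ne_nil hne
    omega
  have hPL : PreL (sales.length : Int) links := hP
  -- A's side computes min over FF 1
  have hAside : solution sales links = min (FF sales links 1).1 (FF sales links 1).2 := by
    rw [solution_eq]
    have hlen : ([0, 0] :: dpInit0 sales).length = sales.length + 1 := by
      simp [dpInit0_len]
    have hinv : InvP sales links ([0, 0] :: dpInit0 sales) :=
      fun w h1 h2 => Or.inl (dpInit_row sales w h1 h2)
    have hI : InvA links (sales.length : Int) ∅ 1 :=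
      ⟨Relation.ReflTransGen.refl, le_rfl, hn, by simp, by simp, by simp⟩
    have hmain := dfs_main sales links hPL hA (sales.length + 1) ∅ 1
      ([0, 0] :: dpInit0 sales) hI (by push_cast; simp) hlen hinv
    rw [ConclP] at hmain
    have hget := dpGet_row_pair _ _ _ _ (by rw [hmain.2.2, FL])
    rw [hget.1, hget.2]
  -- B's side computes min over FF 1 too
  have hBside : solution_alt sales links = min (FF sales links 1).1 (FF sales links 1).2 := by
    rw [solution_alt_eq]
    simp only
    have hreach : ∀ x, PySem.Set.contains
        (reachLoopB (chOf links) (links.length + 1) (PySem.Set.ofList [1])) x = true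
        ↔ Reach1 links x := by
      intro x
      rw [PySem.Set.contains_iff]
      exact mem_reachB_iff links x
    have hC0 : CorrectSv sales links PySem.Dict.empty := by
      intro v p h
      rw [PySem.Dict.get?_empty] at h
      exact absurd h (by simp)
    have hcard0 : (RUF links PySem.Dict.empty).card ≤ links.length + 1 := by
      have hsub : RUF links PySem.Dict.empty ⊆ (links.map (fun l => pvGet l 0)).toFinset := by
        intro u hu
        obtain ⟨_, hld, _⟩ := mem_RUF.mp hu
        rw [isLd, List.any_eq_true] at hld
        obtain ⟨l, hl, he⟩ := hld
        rw [List.mem_toFinset, List.mem_map]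
        exact ⟨l, hl, by simpa using he⟩
      have h1 := Finset.card_le_card hsub
      have h2 := (links.map (fun l => pvGet l 0)).toFinset_card_le
      simp only [List.length_map] at h2
      omega
    have hmain := loopB_main sales links hPL hA hn h3 _ hreach (links.length + 1)
      PySem.Dict.empty hC0 hcard0
    by_cases hc1 : (chOf links).contains 1 = true
    · rw [if_pos hc1]
      have hcont := hmain.2 hc1
      rw [PySem.Dict.contains_eq_isSome_get?] at hcont
      obtain ⟨p, hp⟩ : ∃ p, (loopB (chOf links) sales
          (reachLoopB (chOf links) (links.length + 1) (PySem.Set.ofList [1]))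
          (links.length + 1) PySem.Dict.empty).get? 1 = some p := by
        cases hg : (loopB (chOf links) sales
            (reachLoopB (chOf links) (links.length + 1) (PySem.Set.ofList [1]))
            (links.length + 1) PySem.Dict.empty).get? 1
        · rw [hg] at hcont; simp at hcont
        · exact ⟨_, rfl⟩
      rw [hp]
      have hpFF := (hmain.1 1 p hp).2
      rw [hpFF]
      rfl
    · rw [if_neg hc1]
      have hldf : isLd links 1 = false := by
        rw [← ch_contains]
        cases hh : (chOf links).contains 1
        · rfl
        · exact absurd hh hc1
      rw [FF_nonleader hldf]
  rw [hAside, hBside]
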